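-- pv_equiv track=rewrite | github.com/juanpa9951/RA_projects | dxf_surface_map.py | find_closest_tuple
-- ===== SOURCE A (Python) =====
-- def euclidean_distance(point1, point2):
--     import math
--     return math.sqrt((point1[0] - point2[0]) ** 2 + (point1[1] - point2[1]) ** 2)
--
-- def find_closest_tuple(tuples_list, input_tuple):
--     closest_tuple_low = None
--     closest_tuple_high = None
--     idx_low=None
--     idx_high=None
--
--     smallest_distance = float('inf')  # Initialize with a large number
--     i=0
--     for tup in tuples_list:
--         distance = euclidean_distance(tup, input_tuple)
--         if distance < smallest_distance and tup[0]<input_tuple[0] and tup[1]<input_tuple[1]: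
--             smallest_distance = distance
--             closest_tuple_low = tup
--             idx_low=i
--         i=i+1
--
--     smallest_distance = float('inf')  # Initialize with a large number
--     i=0
--     for tup in tuples_list:
--         distance = euclidean_distance(tup, input_tuple)
--         if distance < smallest_distance and tup[0]>input_tuple[0] and tup[1]>input_tuple[1]:
--             smallest_distance = distance
--             closest_tuple_high = tup
--             idx_high=i
--         i=i+1
--
--     return closest_tuple_low, closest_tuple_high, idx_low, idx_high
-- ===== SOURCE B (Python) =====
-- def find_closest_tuple(tuples_list, input_tuple):
--     import math
--     x, y = input_tuple
--     order = sorted(enumerate(tuples_list),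
--                    key=lambda it: (math.sqrt((it[1][0] - x) ** 2 + (it[1][1] - y) ** 2), it[0]))
--     low = next(((t, i) for i, t in order if t[0] < x and t[1] < y), (None, None))
--     high = next(((t, i) for i, t in order if t[0] > x and t[1] > y), (None, None))
--     return low[0], high[0], low[1], high[1]
-- ===== Notes on version B (the rewrite author's own statement) =====
-- stated objective: alternative
-- what changed: Replaces A's two guarded running-minimum passes (hand-maintained counter, best tuple/index/distance for each side) by one global stable sort of the enumerated points keyed on (euclidean distance, index), followed by picking the first sorted element strictly below and the first strictly above the input point.
import Mathlib
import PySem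

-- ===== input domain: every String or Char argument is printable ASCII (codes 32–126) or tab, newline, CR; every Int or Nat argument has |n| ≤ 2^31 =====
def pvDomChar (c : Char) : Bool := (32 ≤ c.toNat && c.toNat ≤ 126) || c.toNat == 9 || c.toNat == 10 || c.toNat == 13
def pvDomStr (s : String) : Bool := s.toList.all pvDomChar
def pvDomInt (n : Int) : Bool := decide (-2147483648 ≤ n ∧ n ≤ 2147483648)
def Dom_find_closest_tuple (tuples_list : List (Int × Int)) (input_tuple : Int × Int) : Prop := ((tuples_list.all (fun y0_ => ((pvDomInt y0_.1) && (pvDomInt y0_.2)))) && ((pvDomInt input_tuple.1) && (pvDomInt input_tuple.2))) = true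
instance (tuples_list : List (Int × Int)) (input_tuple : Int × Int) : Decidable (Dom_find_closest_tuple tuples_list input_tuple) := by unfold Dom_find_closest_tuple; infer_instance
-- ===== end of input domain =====

-- B sorts the enumerated points once by the key (distance, index) and takes the first element
-- strictly below / strictly above the input point, instead of A's two running-minimum loops.

-- Both Pythons compute math.sqrt of an exact nonnegative integer; it is ported exactly:
-- toDouble rounds the integer to the nearest IEEE-754 double (round-half-even, CPython's int->float),
-- sqrtDouble is the correctly rounded double square root, returned as its exact value scaled by 2^52
-- (all results lie in [1, 2^33), so this scaling is exact); the scaling preserves order and equality,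
-- which is all either Python observes of these floats.
def toDouble (d : Nat) : Nat :=
  if d < 2 ^ 53 then d
  else
    let k := d.log2 + 1 - 53
    let q := d / 2 ^ k
    let r := d - q * 2 ^ k
    let half := 2 ^ (k - 1)
    let q' := if half < r ∨ (r = half ∧ q % 2 = 1) then q + 1 else q
    q' * 2 ^ k

def sqrtDouble (x : Nat) : Nat :=
  if x = 0 then 0
  else
    let n := (Nat.sqrt x).log2 + 1            -- 2^(n-1) ≤ √x < 2^n
    let m := (Nat.sqrt (4 * (x * 4 ^ (53 - n))) + 1) / 2   -- round(√x · 2^(53-n)); ties impossible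
    m * 2 ^ (n - 1)

-- math.sqrt(d) for an exact integer d ≥ 0, as an order/equality-faithful integer encoding
def pySqrtInt (d : Int) : Int := Int.ofNat (sqrtDouble (toDouble d.toNat))

-- ===== PORT A =====
def euclidean_distance (point1 point2 : Int × Int) : Int :=
  pySqrtInt ((point1.1 - point2.1) ^ 2 + (point1.2 - point2.2) ^ 2)

-- float('inf') sentinel ported as `none`: `ltInf d none = true` (everything is below infinity).
def ltInf (d : Int) (s : Option Int) : Bool :=
  match s with
  | none => true
  | some m => decide (d < m)

def find_closest_tuple (tuples_list : List (Int × Int)) (input_tuple : Int × Int) : (Option (Int × Int)) × (Option (Int × Int)) × Option Int × Option Int :=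
  -- state: (smallest_distance, closest_tuple, idx, i)
  let s1 := tuples_list.foldl (fun st tup =>
      let distance := euclidean_distance tup input_tuple
      if ltInf distance st.1 && (decide (tup.1 < input_tuple.1) && decide (tup.2 < input_tuple.2)) then
        (some distance, some tup, some st.2.2.2, st.2.2.2 + 1)
      else
        (st.1, st.2.1, st.2.2.1, st.2.2.2 + 1))
    ((none : Option Int), (none : Option (Int × Int)), (none : Option Int), (0 : Int))
  let s2 := tuples_list.foldl (fun st tup =>
      let distance := euclidean_distance tup input_tuple
      if ltInf distance st.1 && (decide (tup.1 > input_tuple.1) && decide (tup.2 > input_tuple.2)) then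
        (some distance, some tup, some st.2.2.2, st.2.2.2 + 1)
      else
        (st.1, st.2.1, st.2.2.1, st.2.2.2 + 1))
    ((none : Option Int), (none : Option (Int × Int)), (none : Option Int), (0 : Int))
  (s1.2.1, s2.2.1, s1.2.2.1, s2.2.2.1)

-- ===== PORT B =====
-- next(((t, i) for i, t in order if <pred t>), (None, None))
def nextMatch (pred : Int × Int → Bool) (order : List (Int × (Int × Int))) : Option (Int × Int) × Option Int :=
  match order.find? (fun it => pred it.2) with
  | none => (none, none)
  | some it => (some it.2, some it.1)

def find_closest_tuple_alt (tuples_list : List (Int × Int)) (input_tuple : Int × Int) : (Option (Int × Int)) × (Option (Int × Int)) × Option Int × Option Int :=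
  let x := input_tuple.1
  let y := input_tuple.2
  let order := PySem.List.sorted2 (PySem.List.enumerate tuples_list)
      (fun it => pySqrtInt ((it.2.1 - x) ^ 2 + (it.2.2 - y) ^ 2)) (fun it => it.1)
  let low := nextMatch (fun t => decide (t.1 < x) && decide (t.2 < y)) order
  let high := nextMatch (fun t => decide (t.1 > x) && decide (t.2 > y)) order
  (low.1, high.1, low.2, high.2)

-- ===== PRECONDITION & SPEC =====
def Spec_find_closest_tuple (tuples_list : List (Int × Int)) (input_tuple : Int × Int) (out : (Option (Int × Int)) × (Option (Int × Int)) × Option Int × Option Int) : Prop := out = find_closest_tuple_alt tuples_list input_tuple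
instance (tuples_list : List (Int × Int)) (input_tuple : Int × Int) (out : (Option (Int × Int)) × (Option (Int × Int)) × Option Int × Option Int) : Decidable (Spec_find_closest_tuple tuples_list input_tuple out) := by unfold Spec_find_closest_tuple; infer_instance

-- ===== CLAIM =====
def Claim_equal_find_closest_tuple : Prop := ∀ (tuples_list : List (Int × Int)) (input_tuple : Int × Int), Dom_find_closest_tuple tuples_list input_tuple → Spec_find_closest_tuple tuples_list input_tuple (find_closest_tuple tuples_list input_tuple)

-- ===== LEMMAS AND PROOFS =====

-- distance key of an enumerated point (i, t) relative to the input point p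
def kdist (p : Int × Int) (it : Int × (Int × Int)) : Int :=
  pySqrtInt ((it.2.1 - p.1) ^ 2 + (it.2.2 - p.2) ^ 2)

-- lexicographic order on (distance, index) pairs
def lexle (a b : Int × Int) : Prop := a.1 < b.1 ∨ (a.1 = b.1 ∧ a.2 ≤ b.2)

-- proof-side: keep-first running minimum over candidate triples (d, i, t), seeded with a current best
def bestOf (b : Int × Int × (Int × Int)) (cs : List (Int × Int × (Int × Int))) : Int × Int × (Int × Int) :=
  cs.foldl (fun b c => if c.1 < b.1 then c else b) b

lemma bestOf_cons (b c : Int × Int × (Int × Int)) (cs : List (Int × Int × (Int × Int))) :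
    bestOf b (c :: cs) = bestOf (if c.1 < b.1 then c else b) cs := rfl

-- proof-side: the candidate list from start index i0, for an arbitrary coordinate predicate
def candsOf (pred : Int × Int → Bool) (p : Int × Int) (i0 : Int) (l : List (Int × Int)) : List (Int × Int × (Int × Int)) :=
  ((PySem.List.enumerate l i0).filter (fun it => pred it.2)).map
    (fun it => (kdist p it, it.1, it.2))

lemma candsOf_cons (pred : Int × Int → Bool) (p : Int × Int) (i0 : Int) (h : Int × Int) (l : List (Int × Int)) :
    candsOf pred p i0 (h :: l) =
      if pred h then (pySqrtInt ((h.1 - p.1) ^ 2 + (h.2 - p.2) ^ 2), i0, h) :: candsOf pred p (i0 + 1) l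
      else candsOf pred p (i0 + 1) l := by
  simp only [candsOf, PySem.List.enumerate_cons, List.filter_cons]
  split_ifs with hp
  · simp [kdist]
  · simp

-- A's loop step (abstracted over the coordinate predicate)
def stepA (p : Int × Int) (pred : Int × Int → Bool)
    (st : Option Int × Option (Int × Int) × Option Int × Int) (tup : Int × Int) :
    Option Int × Option (Int × Int) × Option Int × Int :=
  let distance := euclidean_distance tup p
  if ltInf distance st.1 && pred tup then
    (some distance, some tup, some st.2.2.2, st.2.2.2 + 1)
  else
    (st.1, st.2.1, st.2.2.1, st.2.2.2 + 1)

lemma stepA_pos (p : Int × Int) (pred : Int × Int → Bool) (st : Option Int × Option (Int × Int) × Option Int × Int)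
    (tup : Int × Int) (hc : (ltInf (euclidean_distance tup p) st.1 && pred tup) = true) :
    stepA p pred st tup = (some (euclidean_distance tup p), some tup, some st.2.2.2, st.2.2.2 + 1) := by
  simp [stepA, hc]

lemma stepA_neg (p : Int × Int) (pred : Int × Int → Bool) (st : Option Int × Option (Int × Int) × Option Int × Int)
    (tup : Int × Int) (hc : (ltInf (euclidean_distance tup p) st.1 && pred tup) = false) :
    stepA p pred st tup = (st.1, st.2.1, st.2.2.1, st.2.2.2 + 1) := by
  simp [stepA, hc]

-- invariant: from a `some`-state, A's loop is the keep-first running minimum seeded with the current best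
lemma loopA_some (p : Int × Int) (pred : Int × Int → Bool) :
    ∀ (l : List (Int × Int)) (d : Int) (t : Int × Int) (j i0 : Int),
      l.foldl (stepA p pred) (some d, some t, some j, i0) =
        (let r := bestOf (d, j, t) (candsOf pred p i0 l)
         (some r.1, some r.2.2, some r.2.1, i0 + l.length)) := by
  intro l
  induction l with
  | nil => intro d t j i0; simp [bestOf, candsOf, PySem.List.enumerate_nil]
  | cons h l ih =>
      intro d t j i0
      have hlen : i0 + (((h :: l).length : Nat) : Int) = (i0 + 1) + ((l.length : Nat) : Int) := by
        simp only [List.length_cons]; push_cast; ring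
      rw [List.foldl_cons, candsOf_cons]
      by_cases hp : pred h
      · by_cases hd : pySqrtInt ((h.1 - p.1) ^ 2 + (h.2 - p.2) ^ 2) < d
        · rw [stepA_pos p pred _ h (by simp [ltInf, euclidean_distance, hp, hd])]
          rw [ih, hlen]
          simp [bestOf_cons, hp, hd, euclidean_distance]
        · rw [stepA_neg p pred _ h (by simp [ltInf, euclidean_distance, hd])]
          rw [ih, hlen]
          simp [bestOf_cons, hp, hd]
      · rw [stepA_neg p pred _ h (by simp [hp])]
        rw [ih, hlen]
        simp [hp]

-- from the initial all-`none` state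
lemma loopA_none (p : Int × Int) (pred : Int × Int → Bool) :
    ∀ (l : List (Int × Int)) (i0 : Int),
      l.foldl (stepA p pred) (none, none, none, i0) =
        (match candsOf pred p i0 l with
         | [] => ((none : Option Int), (none : Option (Int × Int)), (none : Option Int), i0 + l.length)
         | c :: cs =>
             let r := bestOf c cs
             (some r.1, some r.2.2, some r.2.1, i0 + l.length)) := by
  intro l
  induction l with
  | nil => intro i0; simp [candsOf, PySem.List.enumerate_nil]
  | cons h l ih =>
      intro i0
      have hlen : i0 + (((h :: l).length : Nat) : Int) = (i0 + 1) + ((l.length : Nat) : Int) := by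
        simp only [List.length_cons]; push_cast; ring
      rw [List.foldl_cons, candsOf_cons]
      by_cases hp : pred h
      · rw [stepA_pos p pred _ h (by simp [ltInf, hp])]
        rw [loopA_some, hlen]
        simp [hp, euclidean_distance]
      · rw [stepA_neg p pred _ h (by simp [hp])]
        rw [ih, hlen]
        simp [hp]

-- keep-first running minimum on index-increasing triples is the lexicographic (distance, index) minimum
lemma bestOf_min (cs : List (Int × Int × (Int × Int))) :
    ∀ (b : Int × Int × (Int × Int)), (b :: cs).Pairwise (fun a c => a.2.1 < c.2.1) →
      bestOf b cs ∈ b :: cs ∧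
        ∀ c ∈ b :: cs, lexle ((bestOf b cs).1, (bestOf b cs).2.1) (c.1, c.2.1) := by
  induction cs with
  | nil =>
      intro b _
      refine ⟨List.mem_singleton.mpr rfl, ?_⟩
      intro c hc
      rw [List.mem_singleton] at hc
      subst hc
      simp [bestOf, lexle]
  | cons c cs ih =>
      intro b hpw
      rcases List.pairwise_cons.mp hpw with ⟨hb, hpc⟩
      rcases List.pairwise_cons.mp hpc with ⟨hc, hcs⟩
      have hbc : b.2.1 < c.2.1 := hb c (List.mem_cons_self ..)
      have hbcs : ∀ x ∈ cs, b.2.1 < x.2.1 := fun x hx => hb x (List.mem_cons_of_mem _ hx)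
      set b' := if c.1 < b.1 then c else b with hb'
      have hpw' : (b' :: cs).Pairwise (fun a c => a.2.1 < c.2.1) := by
        rw [List.pairwise_cons]
        refine ⟨?_, hcs⟩
        intro x hx
        by_cases hlt : c.1 < b.1 <;> simp only [hb', hlt, if_true, if_false]
        · exact hc x hx
        · exact hbcs x hx
      obtain ⟨hmem, hmin⟩ := ih b' hpw'
      rw [bestOf_cons, ← hb']
      constructor
      · rcases List.mem_cons.mp hmem with h | h
        · rw [h, hb']
          by_cases hlt : c.1 < b.1 <;> simp [hlt]
        · exact List.mem_cons_of_mem _ (List.mem_cons_of_mem _ h)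
      · intro d hd
        have hrb' := hmin b' (List.mem_cons_self ..)
        rcases List.mem_cons.mp hd with hdb | hd'
        · -- d = b
          by_cases hlt : c.1 < b.1
          · have hb'c : b' = c := by rw [hb']; exact if_pos hlt
            rw [hdb]
            rw [hb'c] at hrb' ⊢
            simp only [lexle] at hrb' ⊢
            omega
          · have hb'b : b' = b := by rw [hb']; exact if_neg hlt
            rw [hdb, ← hb'b]
            exact hrb'
        · rcases List.mem_cons.mp hd' with hdc | hd''
          · -- d = c
            by_cases hlt : c.1 < b.1
            · have hb'c : b' = c := by rw [hb']; exact if_pos hlt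
              rw [hdc, ← hb'c]
              exact hrb'
            · have hb'b : b' = b := by rw [hb']; exact if_neg hlt
              rw [hdc]
              rw [hb'b] at hrb' ⊢
              have h2 : ¬ c.1 < b.1 := hlt
              simp only [lexle] at hrb' ⊢
              omega
          · exact hmin d (List.mem_cons_of_mem _ hd'')

-- the strict comparison sorted2 uses on Int keys
lemma insertBy_pairwise_lexle {α : Type} (k1 k2 : α → Int) (x : α) :
    ∀ (acc : List α), acc.Pairwise (fun a b => lexle (k1 a, k2 a) (k1 b, k2 b)) →
      (PySem.List.insertBy
          (fun a b => decide (k1 a < k1 b) || (!decide (k1 b < k1 a) && decide (k2 a < k2 b))) x acc).Pairwise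
        (fun a b => lexle (k1 a, k2 a) (k1 b, k2 b)) := by
  intro acc
  induction acc with
  | nil =>
      intro _
      show List.Pairwise _ [x]
      simp
  | cons y ys ih =>
      intro hpw
      rcases List.pairwise_cons.mp hpw with ⟨hy, hys⟩
      show List.Pairwise _
        (if (decide (k1 x < k1 y) || (!decide (k1 y < k1 x) && decide (k2 x < k2 y))) = true
         then x :: y :: ys
         else y :: PySem.List.insertBy _ x ys)
      split_ifs with hlt
      · have hxy : lexle (k1 x, k2 x) (k1 y, k2 y) := by
          simp only [Bool.or_eq_true, Bool.and_eq_true, Bool.not_eq_true', decide_eq_true_eq,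
            decide_eq_false_iff_not] at hlt
          unfold lexle; simp only []; omega
        rw [List.pairwise_cons]
        refine ⟨?_, hpw⟩
        intro z hz
        rcases List.mem_cons.mp hz with rfl | hz'
        · exact hxy
        · have := hy z hz'
          unfold lexle at hxy this ⊢; omega
      · have hyx : lexle (k1 y, k2 y) (k1 x, k2 x) := by
          simp only [Bool.or_eq_true, Bool.and_eq_true, Bool.not_eq_true', decide_eq_true_eq,
            decide_eq_false_iff_not, not_or, not_and] at hlt
          unfold lexle; simp only []; omega
        rw [List.pairwise_cons]
        refine ⟨?_, ih hys⟩
        intro z hz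
        rcases (PySem.List.mem_insertBy _ _ _ _).mp hz with rfl | hz'
        · exact hyx
        · exact hy z hz'

lemma sorted2_pairwise_lexle {α : Type} (xs : List α) (k1 k2 : α → Int) :
    (PySem.List.sorted2 xs k1 k2 false).Pairwise (fun a b => lexle (k1 a, k2 a) (k1 b, k2 b)) := by
  have e : PySem.List.sorted2 xs k1 k2 false =
      xs.foldl (fun acc x => PySem.List.insertBy
        (fun a b => decide (k1 a < k1 b) || (!decide (k1 b < k1 a) && decide (k2 a < k2 b))) x acc) [] := rfl
  rw [e]
  have : ∀ (ys : List α) (acc : List α),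
      acc.Pairwise (fun a b => lexle (k1 a, k2 a) (k1 b, k2 b)) →
      (ys.foldl (fun acc x => PySem.List.insertBy
        (fun a b => decide (k1 a < k1 b) || (!decide (k1 b < k1 a) && decide (k2 a < k2 b))) x acc) acc).Pairwise
        (fun a b => lexle (k1 a, k2 a) (k1 b, k2 b)) := by
    intro ys
    induction ys with
    | nil => intro acc h; exact h
    | cons y ys ih =>
        intro acc h
        rw [List.foldl_cons]
        exact ih _ (insertBy_pairwise_lexle k1 k2 y acc h)
  exact this xs [] (List.Pairwise.nil)

-- the first match of a pairwise-R list is R-below every later match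
lemma find?_first_min {α : Type} (R : α → α → Prop) (q : α → Bool) :
    ∀ (zs : List α), zs.Pairwise R → ∀ z, zs.find? q = some z →
      ∀ m ∈ zs, q m = true → R z m ∨ z = m := by
  intro zs
  induction zs with
  | nil => intro _ z hz; simp at hz
  | cons a t ih =>
      intro hpw z hz m hm hq
      rw [List.find?_cons] at hz
      rcases List.pairwise_cons.mp hpw with ⟨ha, ht⟩
      by_cases hqa : q a = true
      · simp only [hqa, Option.some.injEq] at hz
        subst hz
        rcases List.mem_cons.mp hm with rfl | hmt
        · right; rfl
        · left; exact ha m hmt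
      · simp only [hqa] at hz
        rcases List.mem_cons.mp hm with rfl | hmt
        · exact absurd hq hqa
        · exact ih ht z hz m hmt hq

-- the index determines an element of enumerate l
lemma enumerate_inj (l : List (Int × Int)) (a b : Int × (Int × Int))
    (ha : a ∈ PySem.List.enumerate l) (hb : b ∈ PySem.List.enumerate l) (h : a.1 = b.1) : a = b := by
  rcases (PySem.List.mem_enumerate_iff _ _ _).mp ha with ⟨ka, hka, rfl⟩
  rcases (PySem.List.mem_enumerate_iff _ _ _).mp hb with ⟨kb, hkb, rfl⟩
  simp only [zero_add] at h
  have : ka = kb := by exact_mod_cast h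
  subst this
  rfl

-- per-side agreement: A's running minimum = B's first match in the sorted order
lemma side_eq (l : List (Int × Int)) (p : Int × Int) (pred : Int × Int → Bool) :
    (((l.foldl (stepA p pred) (none, none, none, 0)).2.1,
      (l.foldl (stepA p pred) (none, none, none, 0)).2.2.1) :
        Option (Int × Int) × Option Int) =
    nextMatch pred (PySem.List.sorted2 (PySem.List.enumerate l)
        (fun it => pySqrtInt ((it.2.1 - p.1) ^ 2 + (it.2.2 - p.2) ^ 2)) (fun it => it.1)) := by
  rw [loopA_none]
  have ekey : (fun it : Int × (Int × Int) => pySqrtInt ((it.2.1 - p.1) ^ 2 + (it.2.2 - p.2) ^ 2)) =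
      kdist p := rfl
  rw [ekey]
  set zs := PySem.List.sorted2 (PySem.List.enumerate l) (kdist p) (fun it => it.1) with hzs
  have hperm : zs.Perm (PySem.List.enumerate l) := PySem.List.sorted2_perm _ _ _ _
  have hzpw : zs.Pairwise (fun a b => lexle (kdist p a, a.1) (kdist p b, b.1)) :=
    sorted2_pairwise_lexle _ _ _
  set m := fun it : Int × (Int × Int) => (kdist p it, it.1, it.2) with hm
  set fs := (PySem.List.enumerate l).filter (fun it => pred it.2) with hfsdef
  have hL : candsOf pred p 0 l = fs.map m := rfl
  have hLpw : (candsOf pred p 0 l).Pairwise (fun a c => a.2.1 < c.2.1) := by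
    rw [hL, List.pairwise_map]
    exact List.Pairwise.sublist List.filter_sublist (PySem.List.pairwise_lt_enumerate _ _)
  cases hcs : candsOf pred p 0 l with
  | nil =>
      have hfsnil : fs = [] := List.map_eq_nil_iff.mp (by rw [← hL, hcs])
      have hnone : zs.find? (fun it => pred it.2) = none := by
        rw [List.find?_eq_none]
        intro x hx hqx
        have hxe : x ∈ PySem.List.enumerate l := hperm.mem_iff.mp hx
        have hxf : x ∈ fs := List.mem_filter.mpr ⟨hxe, hqx⟩
        rw [hfsnil] at hxf
        exact absurd hxf (List.not_mem_nil)
      simp [nextMatch, hnone]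
  | cons c cs' =>
      have hmap : fs.map m = c :: cs' := by rw [← hL, hcs]
      have hpwc : (c :: cs').Pairwise (fun a c => a.2.1 < c.2.1) := hcs ▸ hLpw
      obtain ⟨hrmem, hrmin⟩ := bestOf_min cs' c hpwc
      obtain ⟨g, hgfs, hgr⟩ : ∃ g, g ∈ fs ∧ m g = bestOf c cs' := by
        refine List.mem_map.mp ?_
        rw [hmap]
        exact hrmem
      have hge : g ∈ PySem.List.enumerate l := (List.mem_filter.mp hgfs).1
      have hgq : pred g.2 = true := by simpa using (List.mem_filter.mp hgfs).2
      -- B's side: find? succeeds, because fs is nonempty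
      obtain ⟨f, hffs⟩ : ∃ f, f ∈ fs := by
        cases hfs0 : fs with
        | nil => rw [hfs0] at hmap; simp at hmap
        | cons f ft => exact ⟨f, List.mem_cons_self ..⟩
      have hfe : f ∈ zs := hperm.mem_iff.mpr (List.mem_filter.mp hffs).1
      have hfq : pred f.2 = true := by simpa using (List.mem_filter.mp hffs).2
      obtain ⟨z, hz⟩ : ∃ z, zs.find? (fun it => pred it.2) = some z := by
        cases hfind : zs.find? (fun it => pred it.2) with
        | none =>
            rw [List.find?_eq_none] at hfind
            exact absurd hfq (by simpa using hfind f hfe)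
        | some z => exact ⟨z, rfl⟩
      have hzq : pred z.2 = true := by simpa using List.find?_some hz
      have hzzs : z ∈ zs := List.mem_of_find?_eq_some hz
      have hze : z ∈ PySem.List.enumerate l := hperm.mem_iff.mp hzzs
      -- g is lex-minimal, z is the first match: they coincide
      have hzg1 : lexle ((bestOf c cs').1, (bestOf c cs').2.1) (kdist p z, z.1) := by
        have hzfs : z ∈ fs := List.mem_filter.mpr ⟨hze, by simpa using hzq⟩
        have hmz : m z ∈ c :: cs' := by rw [← hmap]; exact List.mem_map_of_mem hzfs
        exact hrmin _ hmz
      have hzg2 : lexle (kdist p z, z.1) (kdist p g, g.1) ∨ z = g := by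
        have hgzs : g ∈ zs := hperm.mem_iff.mpr hge
        exact find?_first_min _ _ zs hzpw z hz g hgzs hgq
      have hgkey : (kdist p g, g.1, g.2) = bestOf c cs' := hgr
      have hzeg : z = g := by
        rcases hzg2 with h2 | h2
        · refine enumerate_inj l z g hze hge ?_
          rw [← hgkey] at hzg1
          simp only [lexle] at hzg1 h2
          omega
        · exact h2
      subst hzeg
      show ((some (bestOf c cs').2.2 : Option (Int × Int)), (some (bestOf c cs').2.1 : Option Int)) =
        nextMatch pred zs
      rw [← hgkey]
      simp [nextMatch, hz]

-- ===== VERDICT =====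
theorem find_closest_tuple_spec : Claim_equal_find_closest_tuple := by
  intro l p _
  have e1 := side_eq l p (fun t => decide (t.1 < p.1) && decide (t.2 < p.2))
  have e2 := side_eq l p (fun t => decide (t.1 > p.1) && decide (t.2 > p.2))
  show ((l.foldl (stepA p (fun t => decide (t.1 < p.1) && decide (t.2 < p.2))) (none, none, none, 0)).2.1,
        (l.foldl (stepA p (fun t => decide (t.1 > p.1) && decide (t.2 > p.2))) (none, none, none, 0)).2.1,
        (l.foldl (stepA p (fun t => decide (t.1 < p.1) && decide (t.2 < p.2))) (none, none, none, 0)).2.2.1,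
        (l.foldl (stepA p (fun t => decide (t.1 > p.1) && decide (t.2 > p.2))) (none, none, none, 0)).2.2.1) =
       ((nextMatch (fun t => decide (t.1 < p.1) && decide (t.2 < p.2))
          (PySem.List.sorted2 (PySem.List.enumerate l)
            (fun it => pySqrtInt ((it.2.1 - p.1) ^ 2 + (it.2.2 - p.2) ^ 2)) (fun it => it.1))).1,
        (nextMatch (fun t => decide (t.1 > p.1) && decide (t.2 > p.2))
          (PySem.List.sorted2 (PySem.List.enumerate l)
            (fun it => pySqrtInt ((it.2.1 - p.1) ^ 2 + (it.2.2 - p.2) ^ 2)) (fun it => it.1))).1,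
        (nextMatch (fun t => decide (t.1 < p.1) && decide (t.2 < p.2))
          (PySem.List.sorted2 (PySem.List.enumerate l)
            (fun it => pySqrtInt ((it.2.1 - p.1) ^ 2 + (it.2.2 - p.2) ^ 2)) (fun it => it.1))).2,
        (nextMatch (fun t => decide (t.1 > p.1) && decide (t.2 > p.2))
          (PySem.List.sorted2 (PySem.List.enumerate l)
            (fun it => pySqrtInt ((it.2.1 - p.1) ^ 2 + (it.2.2 - p.2) ^ 2)) (fun it => it.1))).2)
  rw [← e1, ← e2]
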